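/- GENERATED by mk_final_copies.py from the proof of the farm's unit `start_decoder.3` (farm:start_decoder.3.1: Lemmas.lean) as the
   re-elaboration sweep compiled it — do not edit. -/
import Vorbis.Spec.Units.start_decoder_3
import Vorbis.Spec.StartDecoderATest

/-!
  Unit `start_decoder.3` (0x113c0c … 0x113d39 + the ten error stubs 0x113d8b … 0x113e3a): the lemmas.

  The segment is cut at every point where a call has returned and its result has been tested: the assertion there is `SegMid`
  (= `Body3` at another program counter, plus the header clauses established so far). `MidMem` is its memory part, and
  `MidMem.frame` carries it over a batch of stores / a callee's footprint whose windows are all `Allowed`.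
-/

namespace Vorbis.Spec.start_decoder_3
open X86 X86.User Asan Vorbis Vorbis.Spec Vorbis.Spec.StartDecoder

/-- **Where the segment and its callees may store**: the stack below the steady stack pointer, the header fields
`sample_rate` / `channels` `[f, f+8)`, `stream` `[f+48, f+56)`, `eof` / `error` `[f+136, f+144)`, the two block sizes
`[f+152, f+160)`, and the frame object `header` `[R+A0H, R+A6H)`. -/
def Allowed (g : Ghost) (w : Span) : Prop :=
  (g.RA - 1888 ≤ w.lo ∧ w.hi ≤ g.R) ∨
  (g.f ≤ w.lo ∧ w.hi ≤ g.f + 8) ∨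
  (g.f + 48 ≤ w.lo ∧ w.hi ≤ g.f + 56) ∨
  (g.f + 136 ≤ w.lo ∧ w.hi ≤ g.f + 144) ∨
  (g.f + 152 ≤ w.lo ∧ w.hi ≤ g.f + 160) ∨
  (g.R + 0xa0 ≤ w.lo ∧ w.hi ≤ g.R + 0xa6)

/-- **Where the stack frame and `*f` are** (nothing of it depends on the memory). -/
structure Pos (g : Ghost) : Prop where
  /-- the return-address slot is 8-aligned -/
  ra8 : g.RA % 8 = 0
  /-- 1888 bytes of stack below the return address -/
  room : 0x700000 + 1888 ≤ g.RA
  /-- the return-address slot is inside the stack region -/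
  top : g.RA + 8 ≤ 0x800000
  /-- `*f` is above the text -/
  flo : 0x119d40 ≤ g.f
  /-- `*f` is below the shadow -/
  fhi : g.f + 1808 ≤ 0xC00000
  /-- `*f` is an object of a caller's frame (above the return address), or off the stack region -/
  foff : g.RA + 8 ≤ g.f ∨ g.f + 1808 ≤ 0x700000 ∨ 0x800000 ≤ g.f
  /-- `*f` does not meet the global `log2_4` (SH7's table) -/
  flog : g.f + 1808 ≤ 0x120640 ∨ 0x120650 ≤ g.f

/-- The steady stack pointer as a number. -/
theorem Pos.r (g : Ghost) (hp : Pos g) : g.R + 1480 = g.RA := by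
  have h1 := hp.room
  unfold Ghost.R steady
  omega

/-- A range that meets no allowed window reads the same after stores into allowed windows. -/
theorem eqOn_of_allowed {g : Ghost} {ws : List Span} {mem mem' : Mem} (hs : Mem.SameExcept ws mem mem')
    (hw : ∀ w, w ∈ ws → Allowed g w) (lo hi : Nat) (hmiss : ∀ w, Allowed g w → hi ≤ w.lo ∨ w.hi ≤ lo) :
    Mem.EqOn lo hi mem mem' := by
  apply hs.eqOn
  intro w hin
  exact hmiss w (hw w hin)

/-- **The memory part of the assertion at every cut point of the segment**: the frame's slots, the text, the shadow layer, SH7, the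
function's footprint, point `SD 0` (the header fields are not constrained by it), `next_seg = 0`. -/
structure MidMem (u₀ : State) (g : Ghost) (A : Arena × List Obj) (mem : Mem) : Prop where
  shadowIdx : mem.u64 (g.R + 8) = (g.R + 0x50) / 8
  saved_rbx : mem.u64 (g.R + 0x598) = (g.e.reg .rbx).toNat
  saved_rbp : mem.u64 (g.R + 0x5a0) = (g.e.reg .rbp).toNat
  saved_r12 : mem.u64 (g.R + 0x5a8) = (g.e.reg .r12).toNat
  saved_r13 : mem.u64 (g.R + 0x5b0) = (g.e.reg .r13).toNat
  saved_r14 : mem.u64 (g.R + 0x5b8) = (g.e.reg .r14).toNat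
  saved_r15 : mem.u64 (g.R + 0x5c0) = (g.e.reg .r15).toNat
  saved_ra : mem.u64 (g.R + 0x5c8) = g.ret.toNat
  code : CodeOK u₀ mem
  shadow : ShadowInv A.2 g.frames' g.R mem
  sh7 : Log2_4In mem
  same : Mem.SameExcept (footprint g) g.e.mem mem
  sd : Real.SD g.len 0 A (g.Blk A) (g.Live A) mem g.f g.R
  next_seg : stb_vorbis.next_seg mem g.f = 0

/-- SH7's table is a global below `*f`, the stack and every allowed window. -/
theorem log2_frame {mem mem' : Mem} (h : Log2_4In mem) (he : Mem.EqOn 0x120640 0x120650 mem mem') : Log2_4In mem' := by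
  intro i hi
  rw [← h i hi]
  have e : (UInt64.ofNat (Vorbis.Globals.log2_4.beg + i)).toNat = 0x120640 + i := by
    have : Vorbis.Globals.log2_4.beg = 0x120640 := rfl
    rw [this, UInt64.toNat_ofNat']
    omega
  exact he.readLE _ 1 (by omega) (by omega) (by omega)

set_option maxHeartbeats 1000000 in
/-- **FRAME of `MidMem`**: a batch of stores, each into an allowed window, keeps the memory part of the assertion, given `Bits`
of the new memory (from the callee's post, or `Bits.frame_fields` for the segment's own stores). -/
theorem MidMem.frame {u₀ : State} {g : Ghost} {A : Arena × List Obj} {mem mem' : Mem} (hp : Pos g)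
    (h : MidMem u₀ g A mem) {ws : List Span} (hs : Mem.SameExcept ws mem mem') (hw : ∀ w, w ∈ ws → Allowed g w)
    (hbits : Bits (g.Blk A) g.len mem' g.f) : MidMem u₀ g A mem' := by
  have hr := hp.r
  obtain ⟨p1, p2, p3, p4, p5, p6, p7⟩ := hp
  -- the ranges the assertion reads
  have eSlots : Mem.EqOn (g.R + 8) (g.R + 0x28) mem mem' := by
    apply eqOn_of_allowed hs hw
    intro w ha
    unfold Allowed at ha
    omega
  have eSaved : Mem.EqOn (g.R + 0x598) (g.R + 0x5d0) mem mem' := by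
    apply eqOn_of_allowed hs hw
    intro w ha
    unfold Allowed at ha
    omega
  have eText : Mem.EqOn L.textLo L.textHi mem mem' := by
    apply eqOn_of_allowed hs hw
    intro w ha
    unfold Allowed at ha
    have e1 : L.textHi = 0x119d40 := rfl
    omega
  have eShadow : Mem.EqOn 0xC00000 0xE00000 mem mem' := by
    apply eqOn_of_allowed hs hw
    intro w ha
    unfold Allowed at ha
    omega
  have eLog : Mem.EqOn 0x120640 0x120650 mem mem' := by
    apply eqOn_of_allowed hs hw
    intro w ha
    unfold Allowed at ha
    omega
  have eA : Mem.EqOn (g.f + 8) (g.f + 48) mem mem' := by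
    apply eqOn_of_allowed hs hw
    intro w ha
    unfold Allowed at ha
    omega
  have eB : Mem.EqOn (g.f + 56) (g.f + 136) mem mem' := by
    apply eqOn_of_allowed hs hw
    intro w ha
    unfold Allowed at ha
    omega
  have eC : Mem.EqOn (g.f + 160) (g.f + 1808) mem mem' := by
    apply eqOn_of_allowed hs hw
    intro w ha
    unfold Allowed at ha
    omega
  have hsd := h.sd
  refine
    { shadowIdx := ?_
      saved_rbx := ?_
      saved_rbp := ?_
      saved_r12 := ?_
      saved_r13 := ?_
      saved_r14 := ?_
      saved_r15 := ?_
      saved_ra := ?_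
      code := Mem.EqOn.trans h.code eText
      shadow := h.shadow.untouched eShadow
      sh7 := log2_frame h.sh7 eLog
      same := ?_
      sd := ?_
      next_seg := ?_ }
  · rw [eSlots.u64 _ (by omega) (by omega) (by omega)]
    exact h.shadowIdx
  · rw [eSaved.u64 _ (by omega) (by omega) (by omega)]
    exact h.saved_rbx
  · rw [eSaved.u64 _ (by omega) (by omega) (by omega)]
    exact h.saved_rbp
  · rw [eSaved.u64 _ (by omega) (by omega) (by omega)]
    exact h.saved_r12
  · rw [eSaved.u64 _ (by omega) (by omega) (by omega)]
    exact h.saved_r13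
  · rw [eSaved.u64 _ (by omega) (by omega) (by omega)]
    exact h.saved_r14
  · rw [eSaved.u64 _ (by omega) (by omega) (by omega)]
    exact h.saved_r15
  · rw [eSaved.u64 _ (by omega) (by omega) (by omega)]
    exact h.saved_ra
  · -- the function's footprint: every allowed window lies in the stack window or in `*f`
    apply h.same.step_same hs
    intro w hin a h1 h2
    have ha := hw w hin
    unfold Allowed at ha
    unfold footprint writes
    have ef : (g.e.reg .rdi).toNat = g.f := rfl
    have er : (g.e.reg .rsp).toNat = g.RA := rfl
    by_cases hst : g.f ≤ a ∧ a < g.f + 1808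
    · refine ⟨(objBlock (g.e.reg .rdi).toNat).span, List.mem_cons_of_mem _ (List.mem_cons_self ..), ?_, ?_⟩
      · rw [ef]
        simp only [vblock]
        omega
      · rw [ef]
        simp only [vblock, voff]
        omega
    · refine ⟨⟨g.RA - depth, g.RA⟩, List.mem_cons_self .., ?_, ?_⟩
      · simp only [depth]
        omega
      · simp only []
        omega
  · -- point `SD 0`: each clause reads a range no allowed window meets
    have hz := hsd.commentZero (by omega)
    have hrest := hsd.rest
    have e160 : restFrom 0 = 160 := rfl
    unfold RestZero at hrest
    rw [e160] at hrest
    simp only [voff] at hz hrest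
    refine
      { env := hsd.env.eqOn eShadow
        frame := hsd.frame.frame eSlots (by omega)
        arena := ArenaOK.frame hsd.arena (by simp only [voff]; omega) ?_
        setups := hsd.setups
        noTemps := hsd.noTemps
        bits := hbits
        first := ?_
        discard0 := ?_
        header := fun h1 => absurd h1 (by omega)
        commentZero := fun _ => ?_
        comment := fun h2 => absurd h2 (by omega)
        cb0 := fun h3 => absurd h3 (by omega)
        codebooks := fun h5 => absurd h5 (by omega)
        floor := fun h6 => absurd h6 (by omega)
        lfl := fun h6 _ => absurd h6 (by omega)
        residue := fun h7 => absurd h7 (by omega)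
        mapping := fun h8 => absurd h8 (by omega)
        mode := fun h9 => absurd h9 (by omega)
        buffers := fun h10 => absurd h10 (by omega)
        mdct := fun h11 => absurd h11 (by omega)
        temp := fun h12 => absurd h12 (by omega)
        rest := ?_ }
    · simp only [voff]
      exact eB.mono (by omega) (by omega)
    · have e := hsd.first
      simp only [vacc, voff] at e ⊢
      rw [eC.u8 _ (by omega) (by omega) (by omega)]
      exact e
    · have e := hsd.discard0
      simp only [vacc, voff] at e ⊢
      rw [eC.i32 _ (by omega) (by omega) (by omega)]
      exact e
    · simp only [voff]
      exact hz.frame (eA.mono (by omega) (by omega)) (by omega)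
    · unfold RestZero
      rw [e160]
      simp only [voff]
      exact hrest.frame (eC.mono (by omega) (by omega)) (by omega)
  · have e := h.next_seg
    simp only [vacc, voff] at e ⊢
    rw [eC.i32 _ (by omega) (by omega) (by omega)]
    exact e

/-- **`Pos` at a cut point**: from the frame's `AtEntry`, the shadow layer (where stack objects are), the callers' frames above the
return address, the hand-over carrier (`*f` inside one live object of the callers) and the laws of the block predicate (`*f` and the
global `log2_4` are two different allocated blocks). -/
theorem pos_of {u₀ : State} {g : Ghost} {pc : Word} {A : Arena × List Obj} {v : State} (hfr : Frame u₀ g pc A v)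
    (hh : g.Hand A) (hok : BlkOK (g.Blk A)) : Pos g := by
  obtain ⟨r1, r2, r3⟩ := hfr.ra
  simp only [depth] at r2
  have hinv := hfr.shadow
  have hobj' : LiveIn A.2 g.frames' g.f Off.sizeof.stb_vorbis := hh.obj.mono (sub_frames' g A)
  have hw := hobj'.where_ hinv hfr.offText (by decide)
  simp only [Off.sizeof.stb_vorbis] at hw
  obtain ⟨w1, w2, w3⟩ := hw
  refine ⟨r1, r2, r3, w1, w2, ?_, ?_⟩
  · -- a stack object of a caller's frame lies above the return address
    obtain ⟨o, ho, h1, h2⟩ := hh.obj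
    simp only [Off.sizeof.stb_vorbis] at h2
    rcases List.mem_append.mp ho with hs | hoth
    · left
      unfold stackObjs at hs
      obtain ⟨bF, hbF, hin⟩ := List.mem_flatMap.mp hs
      have hbF' : bF ∈ g.frames' := List.mem_cons_of_mem _ hbF
      obtain ⟨k1, k2, _, _, _⟩ := hinv.stack.active bF hbF'
      obtain ⟨g1, _⟩ := FrameLayout.objsAt_gran k1 k2 hin
      have hc := hfr.callers bF hbF
      have e : o.gLo = o.base / 8 := rfl
      omega
    · right
      have := hinv.off o hoth
      unfold OffStack at this
      omega
  · -- `*f` and `log2_4` are different allocated blocks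
    have hB : g.Blk A (objBlock g.f) := runBlk_extra List.mem_cons_self
    have hC : g.Blk A ⟨0x120640, 16⟩ := by
      apply runBlk_extra
      apply List.mem_cons_of_mem
      unfold fixedBlocks globalBlocks
      simp only [List.mem_cons, true_or, or_true]
    have hd := hok.disjoint hB hC (by
      intro e
      have := congrArg Block.size e
      simp only [vblock, voff] at this
      omega)
    simp only [vblock, voff] at hd
    omega

/-- **Where a CALLEE of the segment may store** (getn, vorbis_validate, get32, get8, error, the check routine) and where the
segment's own `call` pushes go: the stack below the steady stack pointer, `stream`, `eof` / `error`, the frame object `header`.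
NOT the four header fields. -/
def Callee (g : Ghost) (w : Span) : Prop :=
  (g.RA - 1888 ≤ w.lo ∧ w.hi ≤ g.R) ∨
  (g.f + 48 ≤ w.lo ∧ w.hi ≤ g.f + 56) ∨
  (g.f + 136 ≤ w.lo ∧ w.hi ≤ g.f + 144) ∨
  (g.R + 0xa0 ≤ w.lo ∧ w.hi ≤ g.R + 0xa6)

/-- A callee's window is an allowed window. -/
theorem Callee.allowed {g : Ghost} {w : Span} (h : Callee g w) : Allowed g w := by
  unfold Callee at h
  unfold Allowed
  omega

/-- **The header clauses established so far**: `k ≥ 1` HD1 (after the two tests of line 3646 / 3647), `k ≥ 2` HD2 (line 3648),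
`k ≥ 3` HD3 (lines 3659 – 3661). -/
structure Hd (k : Nat) (mem : Mem) (f : Nat) : Prop where
  hd1 : 1 ≤ k → 1 ≤ stb_vorbis.channels mem f ∧ stb_vorbis.channels mem f ≤ 16
  hd2 : 2 ≤ k → stb_vorbis.sample_rate mem f ≠ 0
  hd3 : 3 ≤ k → HD3 mem f

/-- Nothing established yet. -/
theorem Hd.zero (mem : Mem) (f : Nat) : Hd 0 mem f :=
  ⟨fun h => absurd h (by omega), fun h => absurd h (by omega), fun h => absurd h (by omega)⟩

/-- Fewer clauses. -/
theorem Hd.weaken {k k' : Nat} {mem : Mem} {f : Nat} (h : Hd k mem f) (hk : k' ≤ k) : Hd k' mem f :=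
  ⟨fun h1 => h.hd1 (by omega), fun h2 => h.hd2 (by omega), fun h3 => h.hd3 (by omega)⟩

/-- **FRAME of the header clauses**: the two ranges `[f, f+8)` and `[f+152, f+160)` read the same. -/
theorem Hd.frame {k : Nat} {mem mem' : Mem} {f : Nat} (h : Hd k mem f) (hf : f + 1808 ≤ 2 ^ 64)
    (e1 : Mem.EqOn f (f + 8) mem mem') (e2 : Mem.EqOn (f + 152) (f + 160) mem mem') : Hd k mem' f := by
  have c1 : stb_vorbis.channels mem' f = stb_vorbis.channels mem f := by
    simp only [vacc, voff]
    exact e1.i32 _ (by omega) (by omega) (by omega)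
  have c2 : stb_vorbis.sample_rate mem' f = stb_vorbis.sample_rate mem f := by
    simp only [vacc, voff]
    exact e1.u32 _ (by omega) (by omega) (by omega)
  have c3 : stb_vorbis.blocksize_0 mem' f = stb_vorbis.blocksize_0 mem f := by
    simp only [vacc, voff]
    exact e2.i32 _ (by omega) (by omega) (by omega)
  have c4 : stb_vorbis.blocksize_1 mem' f = stb_vorbis.blocksize_1 mem f := by
    simp only [vacc, voff]
    exact e2.i32 _ (by omega) (by omega) (by omega)
  refine ⟨fun h1 => ?_, fun h2 => ?_, fun h3 => ?_⟩
  · rw [c1]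
    exact h.hd1 h1
  · rw [c2]
    exact h.hd2 h2
  · unfold HD3
    rw [c3, c4]
    exact h.hd3 h3

/-- **THE ASSERTION AT EVERY CUT POINT OF THE SEGMENT** (`Body3` at the program counter `pc`, with the stack pointer and `f`
spelled the way the walker reads them, and the header clauses `Hd k` established so far). -/
structure SegMid (u₀ : State) (g : Ghost) (A : Arena × List Obj) (pc : Word) (k : Nat) (v : State) : Prop where
  entry : AtEntry (conv u₀) L.start_decoder.entry depth g.ret g.e
  rip : v.rip = pc
  rsp : v.reg .rsp = g.e.reg .rsp - 1480
  rbp : v.reg .rbp = g.e.reg .rdi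
  inv : abiInv v
  mm : MidMem u₀ g A v.mem
  pos : Pos g
  hand : g.Hand A
  offText : ∀ o, o ∈ A.2 → L.textHi ≤ o.base
  ext : g.A0.1.Extends A.1
  callers : ∀ bF, bF ∈ g.frames → g.RA + 8 ≤ bF.1
  hd : Hd k v.mem g.f

/-- The steady stack pointer, as the walker spells it. -/
theorem addr_R {g : Ghost} (hp : Pos g) : addr g.R = g.e.reg .rsp - 1480 := by
  have h1 := hp.room
  have hr := hp.r
  have er : (g.e.reg .rsp).toNat = g.RA := rfl
  symm
  apply eq_addr
  have hle : (1480 : UInt64) ≤ g.e.reg .rsp := by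
    rw [UInt64.le_iff_toNat_le]
    show 1480 ≤ (g.e.reg .rsp).toNat
    omega
  rw [UInt64.toNat_sub_of_le _ _ hle]
  show (g.e.reg .rsp).toNat - 1480 = g.R
  omega

/-- `f`, as the walker spells it. -/
theorem addr_f (g : Ghost) : addr g.f = g.e.reg .rdi := by
  symm
  exact eq_addr _ _ rfl

/-- **The segment's entry assertion gives `SegMid` at its entry.** -/
theorem SegMid.of_body3 {u₀ : State} {g : Ghost} {A : Arena × List Obj} {v : State} (h : Body3 u₀ g A v) :
    SegMid u₀ g A pc_3 0 v := by
  have hp : Pos g := pos_of h.frame h.hand h.sd.env.ok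
  have hf := h.frame
  exact
    { entry := hf.entry
      rip := hf.rip
      rsp := by
        rw [hf.rsp]
        exact addr_R hp
      rbp := by
        rw [h.rbp]
        exact addr_f g
      inv := hf.inv
      mm := ⟨hf.shadowIdx, hf.saved_rbx, hf.saved_rbp, hf.saved_r12, hf.saved_r13, hf.saved_r14, hf.saved_r15, hf.saved_ra,
        hf.code, hf.shadow, hf.sh7, hf.same, h.sd, h.next_seg⟩
      pos := hp
      hand := h.hand
      offText := hf.offText
      ext := hf.ext
      callers := hf.callers
      hd := Hd.zero _ _ }

/-- **`SegMid` gives the common part `Frame` of the assertion family** at its program counter. -/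
theorem SegMid.frameAt {u₀ : State} {g : Ghost} {A : Arena × List Obj} {pc : Word} {k : Nat} {v : State}
    (h : SegMid u₀ g A pc k v) : Frame u₀ g pc A v :=
  { entry := h.entry
    rip := h.rip
    rsp := by
      rw [h.rsp]
      exact (addr_R h.pos).symm
    shadowIdx := h.mm.shadowIdx
    saved_rbx := h.mm.saved_rbx
    saved_rbp := h.mm.saved_rbp
    saved_r12 := h.mm.saved_r12
    saved_r13 := h.mm.saved_r13
    saved_r14 := h.mm.saved_r14
    saved_r15 := h.mm.saved_r15
    saved_ra := h.mm.saved_ra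
    code := h.mm.code
    inv := h.inv
    shadow := h.mm.shadow
    offText := h.offText
    ext := h.ext
    callers := h.callers
    sh7 := h.mm.sh7
    same := h.mm.same }

/-- **The exit to segment `.4`**: `SegMid` at 0x113d3f with HD1 – HD3 is `At4`. -/
theorem SegMid.at4 {u₀ : State} {g : Ghost} {A : Arena × List Obj} {v : State} (h : SegMid u₀ g A pc_4 3 v) : At4 u₀ g v := by
  refine ⟨A, h.frameAt, h.hand, ?_, ?_, h.mm.next_seg⟩
  · rw [h.rbp]
    exact (addr_f g).symm
  · exact sd1_of_sd0 h.mm.sd ⟨h.hd.hd1 (by omega), h.hd.hd2 (by omega), h.hd.hd3 (by omega)⟩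

/-- **The exit to the common epilogue**: `SegMid` at 0x113b22 with eax = 0 is `AtERR` (SD.ERR from `SD 0`: the header fields are
not constrained by `DeinitOK`). -/
theorem SegMid.atErr {u₀ : State} {g : Ghost} {A : Arena × List Obj} {k : Nat} {v : State} (h : SegMid u₀ g A pc_ERR k v)
    (hax : (v.reg .rax).toNat % 2 ^ 32 = 0) : AtERR u₀ g v :=
  ⟨A, h.frameAt, h.hand, Or.inl ⟨hax, Failed.of_sd h.mm.sd⟩⟩

/-- Fewer header clauses. -/
theorem SegMid.weaken {u₀ : State} {g : Ghost} {A : Arena × List Obj} {pc : Word} {k k' : Nat} {v : State}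
    (h : SegMid u₀ g A pc k v) (hk : k' ≤ k) : SegMid u₀ g A pc k' v :=
  { h with hd := h.hd.weaken hk }

/-- **`SegMid` after a callee** (and the segment's own pushes): every window of the footprint between the two states is a callee's
window; `Bits` of the new memory from the callee's post. The header clauses are kept. -/
theorem SegMid.after {u₀ : State} {g : Ghost} {A : Arena × List Obj} {pc pc' : Word} {k : Nat} {v w : State}
    (h : SegMid u₀ g A pc k v) (hrip : w.rip = pc') (hrsp : w.reg .rsp = g.e.reg .rsp - 1480)
    (hrbp : w.reg .rbp = g.e.reg .rdi) (hinv : abiInv w) {ws : List Span} (hs : Mem.SameExcept ws v.mem w.mem)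
    (hw : ∀ s, s ∈ ws → Callee g s) (hbits : Bits (g.Blk A) g.len w.mem g.f) : SegMid u₀ g A pc' k w := by
  have hp := h.pos
  have hr := hp.r
  obtain ⟨p1, p2, p3, p4, p5, p6, p7⟩ := hp
  have e1 : Mem.EqOn g.f (g.f + 8) v.mem w.mem := by
    apply hs.eqOn
    intro s hin
    have hc := hw s hin
    unfold Callee at hc
    omega
  have e2 : Mem.EqOn (g.f + 152) (g.f + 160) v.mem w.mem := by
    apply hs.eqOn
    intro s hin
    have hc := hw s hin
    unfold Callee at hc
    omega
  exact
    { entry := h.entry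
      rip := hrip
      rsp := hrsp
      rbp := hrbp
      inv := hinv
      mm := h.mm.frame h.pos hs (fun s hin => (hw s hin).allowed) hbits
      pos := h.pos
      hand := h.hand
      offText := h.offText
      ext := h.ext
      callers := h.callers
      hd := h.hd.frame (by omega) e1 e2 }

/-- **The shadow clause at a callee's entry**: the segment has pushed the return address below the steady stack pointer. -/
theorem SegMid.shadowPre {u₀ : State} {g : Ghost} {A : Arena × List Obj} {pc : Word} {k : Nat} {v s : State}
    (h : SegMid u₀ g A pc k v) (x : Nat) (hmem : s.mem = v.mem.writeLE (g.e.reg .rsp - 1488) 8 x)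
    (hrsp : s.reg .rsp = g.e.reg .rsp - 1488) : ShadowPre A.2 g.frames' s := by
  have hp := h.pos
  have hr := hp.r
  have er : (g.e.reg .rsp).toNat = g.RA := rfl
  have h1 := hp.room
  have h2 := hp.top
  have e : (g.e.reg .rsp - 1488).toNat = g.R - 8 := by
    have hle : (1488 : UInt64) ≤ g.e.reg .rsp := by
      rw [UInt64.le_iff_toNat_le]
      show 1488 ≤ (g.e.reg .rsp).toNat
      omega
    rw [UInt64.toNat_sub_of_le _ _ hle]
    show (g.e.reg .rsp).toNat - 1488 = g.R - 8
    omega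
  refine ⟨?_, h.offText⟩
  rw [hmem, hrsp, e]
  have e3 : g.R - 8 + 8 = g.R := by omega
  rw [e3]
  apply h.mm.shadow.writeLE
  · rw [e]
    omega
  · rw [e]
    omega

/-- The address of the return-address slot of a call made at the steady stack pointer, as a number. -/
theorem toNat_push {g : Ghost} (hp : Pos g) : (g.e.reg .rsp - 1488).toNat = g.R - 8 := by
  have hr := hp.r
  have er : (g.e.reg .rsp).toNat = g.RA := rfl
  have h1 := hp.room
  have hle : (1488 : UInt64) ≤ g.e.reg .rsp := by
    rw [UInt64.le_iff_toNat_le]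
    show 1488 ≤ (g.e.reg .rsp).toNat
    omega
  rw [UInt64.toNat_sub_of_le _ _ hle]
  show (g.e.reg .rsp).toNat - 1488 = g.R - 8
  omega

/-- `Bits f` after the push of a return address below the steady stack pointer. -/
theorem SegMid.bits_push {u₀ : State} {g : Ghost} {A : Arena × List Obj} {pc : Word} {k : Nat} {v : State}
    (h : SegMid u₀ g A pc k v) (x : Nat) :
    Bits (g.Blk A) g.len (v.mem.writeLE (g.e.reg .rsp - 1488) 8 x) g.f := by
  have hp := h.pos
  have hr := hp.r
  have e := toNat_push hp
  obtain ⟨p1, p2, p3, p4, p5, p6, p7⟩ := hp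
  apply (Reader.store_off_obj h.mm.sd.bits _ 8 x ?_ ?_).1.bits
  · rw [e]
    omega
  · rw [e]
    omega

/-- **The precondition of a reader (get8, get32) called at the steady stack pointer with `rdi = f`.** -/
theorem SegMid.readerPre {u₀ : State} {g : Ghost} {A : Arena × List Obj} {pc : Word} {k : Nat} {v s : State}
    (h : SegMid u₀ g A pc k v) (x : Nat) (hmem : s.mem = v.mem.writeLE (g.e.reg .rsp - 1488) 8 x)
    (hrsp : s.reg .rsp = g.e.reg .rsp - 1488) (hrdi : s.reg .rdi = g.e.reg .rdi) :
    ReaderPre A.2 g.frames' (g.Blk A) g.len s := by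
  have e : (s.reg .rdi).toNat = g.f := by
    rw [hrdi]
    rfl
  refine ⟨h.shadowPre x hmem hrsp, ?_, ?_⟩
  · rw [e]
    exact readerEnv h.hand h.mm.sd.env.live
  · rw [e, hmem]
    exact h.bits_push x

/-- A field of `*f`, as the walker spells its address (`off` a literal). -/
theorem addr_field {g : Ghost} (hp : Pos g) (off : Nat) (ho : off ≤ 1808) :
    g.e.reg .rdi + UInt64.ofNat off = addr (g.f + off) := by
  have h5 := hp.fhi
  apply eq_addr
  rw [toNat_add_ofNat _ _ (by
    show (g.e.reg .rdi).toNat + off < 2 ^ 64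
    have ef : (g.e.reg .rdi).toNat = g.f := rfl
    omega)]
  rfl

/-- **Where the segment ITSELF stores** (the pushes of its calls, the four header fields) and where `error` stores: none of these is
read by `Bits f`. -/
def OwnWin (g : Ghost) (w : Span) : Prop :=
  (g.RA - 1888 ≤ w.lo ∧ w.hi ≤ g.R) ∨
  (g.f ≤ w.lo ∧ w.hi ≤ g.f + 8) ∨
  (g.f + 136 ≤ w.lo ∧ w.hi ≤ g.f + 144) ∨
  (g.f + 152 ≤ w.lo ∧ w.hi ≤ g.f + 160)

/-- `Bits f` does not read the header fields nor the stack below the steady stack pointer. -/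
theorem bits_own {g : Ghost} (hp : Pos g) {Blk : Block → Prop} {len : Nat} {mem mem' : Mem} {ws : List Span}
    (h : Bits Blk len mem g.f) (hs : Mem.SameExcept ws mem mem') (hw : ∀ s, s ∈ ws → OwnWin g s) : Bits Blk len mem' g.f := by
  have hr := hp.r
  obtain ⟨p1, p2, p3, p4, p5, p6, p7⟩ := hp
  apply h.frame_fields
  apply Bits.SameFields.of_sameExcept hs
  all_goals
    intro w hin
    have ho := hw w hin
    unfold OwnWin at ho
    omega

/-- **`SegMid` after stores into allowed windows** (the segment's own stores to the header fields among them): `Bits` and the header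
clauses of the new memory are given. -/
theorem SegMid.afterStore {u₀ : State} {g : Ghost} {A : Arena × List Obj} {pc pc' : Word} {k k' : Nat} {v w : State}
    (h : SegMid u₀ g A pc k v) (hrip : w.rip = pc') (hrsp : w.reg .rsp = g.e.reg .rsp - 1480)
    (hrbp : w.reg .rbp = g.e.reg .rdi) (hinv : abiInv w) {ws : List Span} (hs : Mem.SameExcept ws v.mem w.mem)
    (hw : ∀ s, s ∈ ws → Allowed g s) (hbits : Bits (g.Blk A) g.len w.mem g.f) (hhd : Hd k' w.mem g.f) :
    SegMid u₀ g A pc' k' w :=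
  { entry := h.entry
    rip := hrip
    rsp := hrsp
    rbp := hrbp
    inv := hinv
    mm := h.mm.frame h.pos hs hw hbits
    pos := h.pos
    hand := h.hand
    offText := h.offText
    ext := h.ext
    callers := h.callers
    hd := hhd }

/-- **A check of a 4-byte store to a field of `*f`**: `*f` lies inside one live object, and no store since the cut point went to
the shadow (every window is an allowed window). -/
theorem SegMid.check4 {u₀ : State} {g : Ghost} {A : Arena × List Obj} {pc : Word} {k : Nat} {v : State}
    (h : SegMid u₀ g A pc k v) {mem' : Mem} {ws : List Span} (hs : Mem.SameExcept ws v.mem mem')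
    (hw : ∀ s, s ∈ ws → Allowed g s) (b : Word) (off : Nat) (hb : b.toNat = g.f + off) (ho : off + 4 ≤ 1808) :
    AccSmall 4 mem' b := by
  have hp := h.pos
  have hr := hp.r
  obtain ⟨p1, p2, p3, p4, p5, p6, p7⟩ := hp
  have hun : ShadowUntouched v.mem mem' := by
    apply eqOn_of_allowed hs hw
    intro w ha
    unfold Allowed at ha
    omega
  have hobj : LiveIn A.2 g.frames' g.f Off.sizeof.stb_vorbis := h.hand.obj.mono (sub_frames' g A)
  simp only [voff] at hobj
  exact hobj.accSmall h.mm.shadow hun b 4 (by decide) (by omega) (by omega)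

/-- The standard footprint of a chunk of the segment (the stack below the steady stack pointer, `stream`, `eof` / `error`, the frame
object `header`) consists of callee windows. -/
theorem callee_std {g : Ghost} (hp : Pos g) : ∀ s, s ∈ [(⟨(g.e.reg .rsp).toNat - 1888, (g.e.reg .rsp).toNat - 1480⟩ : Span),
    ⟨(g.e.reg .rdi).toNat + 48, (g.e.reg .rdi).toNat + 56⟩, ⟨(g.e.reg .rdi).toNat + 136, (g.e.reg .rdi).toNat + 144⟩,
    ⟨(g.e.reg .rsp).toNat - 1320, (g.e.reg .rsp).toNat - 1314⟩] → Callee g s := by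
  intro s hs
  have hr := hp.r
  have h1 := hp.room
  have er : (g.e.reg .rsp).toNat = g.RA := rfl
  have ef : (g.e.reg .rdi).toNat = g.f := rfl
  simp only [List.mem_cons, List.not_mem_nil, or_false] at hs
  unfold Callee
  rcases hs with rfl | rfl | rfl | rfl
  all_goals
    simp only []
    omega

/-- The footprint of a chunk with stores to the header fields consists of allowed windows. -/
theorem allowed_std {g : Ghost} (hp : Pos g) : ∀ s, s ∈ [(⟨(g.e.reg .rsp).toNat - 1888, (g.e.reg .rsp).toNat - 1480⟩ : Span),
    ⟨(g.e.reg .rdi).toNat + 48, (g.e.reg .rdi).toNat + 56⟩, ⟨(g.e.reg .rdi).toNat + 136, (g.e.reg .rdi).toNat + 144⟩,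
    ⟨(g.e.reg .rsp).toNat - 1320, (g.e.reg .rsp).toNat - 1314⟩,
    ⟨(g.e.reg .rdi).toNat, (g.e.reg .rdi).toNat + 8⟩, ⟨(g.e.reg .rdi).toNat + 152, (g.e.reg .rdi).toNat + 160⟩] →
    Allowed g s := by
  intro s hs
  have hr := hp.r
  have h1 := hp.room
  have er : (g.e.reg .rsp).toNat = g.RA := rfl
  have ef : (g.e.reg .rdi).toNat = g.f := rfl
  simp only [List.mem_cons, List.not_mem_nil, or_false] at hs
  unfold Allowed
  rcases hs with rfl | rfl | rfl | rfl | rfl | rfl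
  all_goals
    simp only []
    omega

/-- The segment's own stores after a callee has returned: the push of a check's return address, the header fields. -/
theorem own_std {g : Ghost} (hp : Pos g) : ∀ s, s ∈ [(⟨(g.e.reg .rsp).toNat - 1888, (g.e.reg .rsp).toNat - 1480⟩ : Span),
    ⟨(g.e.reg .rdi).toNat, (g.e.reg .rdi).toNat + 8⟩, ⟨(g.e.reg .rdi).toNat + 152, (g.e.reg .rdi).toNat + 160⟩,
    ⟨(g.e.reg .rdi).toNat + 136, (g.e.reg .rdi).toNat + 144⟩] →
    OwnWin g s := by
  intro s hs
  have hr := hp.r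
  have h1 := hp.room
  have er : (g.e.reg .rsp).toNat = g.RA := rfl
  have ef : (g.e.reg .rdi).toNat = g.f := rfl
  simp only [List.mem_cons, List.not_mem_nil, or_false] at hs
  unfold OwnWin
  rcases hs with rfl | rfl | rfl | rfl
  all_goals
    simp only []
    omega

/-- The two tests of lines 3646 / 3647 on the zero-extended byte `get8` returned: `1 ≤ channels ≤ 16`. -/
theorem chan_range (y : BitVec 8) (h0 : ¬ (BitVec.zeroExtend 32 y).toNat = 0)
    (h16 : ¬ (16#32).toInt < (BitVec.zeroExtend 32 y).toInt) :
    1 ≤ (BitVec.zeroExtend 32 y).toInt ∧ (BitVec.zeroExtend 32 y).toInt ≤ 16 := by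
  have hy := y.isLt
  have e : (BitVec.zeroExtend 32 y).toNat = y.toNat := by
    simp only [BitVec.toNat_setWidth, BitVec.zeroExtend]
    omega
  have e2 : (BitVec.zeroExtend 32 y).toInt = ((BitVec.zeroExtend 32 y).toNat : Int) := toInt_of_lt _ (by omega)
  have e3 : (16#32).toInt = 16 := by decide
  omega

/-- HD1 over the store of `sample_rate` (and a push): `channels` `[f+4, f+8)` reads the same. -/
theorem keep_chan {g : Ghost} (hp : Pos g) {mem mem' : Mem} (h : Hd 1 mem g.f)
    (hs : Mem.SameExcept [⟨(g.e.reg .rsp).toNat - 1888, (g.e.reg .rsp).toNat - 1480⟩,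
      ⟨(g.e.reg .rdi).toNat, (g.e.reg .rdi).toNat + 4⟩] mem mem') :
    1 ≤ stb_vorbis.channels mem' g.f ∧ stb_vorbis.channels mem' g.f ≤ 16 := by
  have hr := hp.r
  have er : (g.e.reg .rsp).toNat = g.RA := rfl
  have ef : (g.e.reg .rdi).toNat = g.f := rfl
  obtain ⟨p1, p2, p3, p4, p5, p6, p7⟩ := hp
  have e : Mem.EqOn (g.f + 4) (g.f + 8) mem mem' := by
    apply hs.eqOn
    intro w hw
    simp only [List.mem_cons, List.not_mem_nil, or_false] at hw
    rcases hw with rfl | rfl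
    all_goals
      simp only []
      omega
  have c1 : stb_vorbis.channels mem' g.f = stb_vorbis.channels mem g.f := by
    simp only [vacc, voff]
    exact e.i32 _ (by omega) (by omega) (by omega)
  rw [c1]
  exact h.hd1 (by omega)

/-- HD1, HD2 over the stores of the two block sizes (and the pushes): `[f, f+8)` reads the same. -/
theorem keep_hd2 {g : Ghost} (hp : Pos g) {mem mem' : Mem} (h : Hd 2 mem g.f)
    (hs : Mem.SameExcept [⟨(g.e.reg .rsp).toNat - 1888, (g.e.reg .rsp).toNat - 1480⟩,
      ⟨(g.e.reg .rdi).toNat + 152, (g.e.reg .rdi).toNat + 160⟩] mem mem') :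
    (1 ≤ stb_vorbis.channels mem' g.f ∧ stb_vorbis.channels mem' g.f ≤ 16) ∧ stb_vorbis.sample_rate mem' g.f ≠ 0 := by
  have hr := hp.r
  have er : (g.e.reg .rsp).toNat = g.RA := rfl
  have ef : (g.e.reg .rdi).toNat = g.f := rfl
  obtain ⟨p1, p2, p3, p4, p5, p6, p7⟩ := hp
  have e : Mem.EqOn g.f (g.f + 8) mem mem' := by
    apply hs.eqOn
    intro w hw
    simp only [List.mem_cons, List.not_mem_nil, or_false] at hw
    rcases hw with rfl | rfl
    all_goals
      simp only []
      omega
  have c1 : stb_vorbis.channels mem' g.f = stb_vorbis.channels mem g.f := by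
    simp only [vacc, voff]
    exact e.i32 _ (by omega) (by omega) (by omega)
  have c2 : stb_vorbis.sample_rate mem' g.f = stb_vorbis.sample_rate mem g.f := by
    simp only [vacc, voff]
    exact e.u32 _ (by omega) (by omega) (by omega)
  rw [c1, c2]
  exact ⟨h.hd1 (by omega), h.hd2 (by omega)⟩

/-- The address of the frame object `header` (`lea …, [rsp+0xa0]` at the steady stack pointer), as a number. -/
theorem toNat_header {g : Ghost} (hp : Pos g) : (g.e.reg .rsp - 1320).toNat = g.R + 0xa0 := by
  have hr := hp.r
  have er : (g.e.reg .rsp).toNat = g.RA := rfl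
  have h1 := hp.room
  have hle : (1320 : UInt64) ≤ g.e.reg .rsp := by
    rw [UInt64.le_iff_toNat_le]
    show 1320 ≤ (g.e.reg .rsp).toNat
    omega
  rw [UInt64.toNat_sub_of_le _ _ hle]
  show (g.e.reg .rsp).toNat - 1320 = g.R + 0xa0
  omega

/-- **The frame object `header`** (6 bytes at `[R + A0H]`, offset 80 of the protected frame at `[R + 50H]`) is a live object
inside the function. -/
theorem header_live (g : Ghost) (A : Arena × List Obj) : LiveIn A.2 g.frames' (g.R + 0xa0) 6 := by
  refine ⟨⟨g.base + 80, 6, .stack⟩, ?_, ?_, ?_⟩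
  · apply List.mem_append_left
    unfold Ghost.frames'
    rw [stackObjs_cons]
    apply List.mem_append_left
    unfold FrameLayout.objsAt Vorbis.Frames.start_decoder
    simp only [List.map_cons, List.mem_cons, true_or, or_true]
  · show g.R + 0x50 + 80 ≤ g.R + 0xa0
    omega
  · show g.R + 0xa0 + 6 ≤ g.R + 0x50 + 80 + 6
    omega

/-- SH5: the global `vorbis` (the six bytes `vorbis_validate` compares with) is a live object. -/
theorem vorbis_live {g : Ghost} {A : Arena × List Obj} (hh : g.Hand A) :
    LiveIn A.2 g.frames' Vorbis.Globals.vorbis.beg Vorbis.Globals.vorbis.size :=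
  ⟨Vorbis.Globals.vorbis.obj, List.mem_append_right _ hh.g_vorbis, Nat.le_refl _, Nat.le_refl _⟩

/-- An `int` field whose four bytes are the number of a 32-bit vector: its signed value. -/
theorem i32_of_readLE (mem : Mem) (a : Nat) (x : BitVec 32) (h : mem.readLE (addr a) 4 = x.toNat) :
    mem.i32 a = x.toInt := by
  have e := Mem.i32_writeLE_same_bv mem a x
  rw [Mem.i32_writeLE_same, Nat.mod_eq_of_lt x.isLt] at e
  rw [← e, Mem.i32_def]
  exact congrArg sint32 h

/-- `1 << a` for a shift count in `[6, 13]`, as the signed value of the 32-bit result. -/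
theorem pow_shift (a : Nat) (h6 : 6 ≤ a) (h13 : a ≤ 13) : (1#32 <<< (a % 32)).toInt = ((2 ^ a : Nat) : Int) := by
  have hc : a = 6 ∨ a = 7 ∨ a = 8 ∨ a = 9 ∨ a = 10 ∨ a = 11 ∨ a = 12 ∨ a = 13 := by omega
  rcases hc with rfl | rfl | rfl | rfl | rfl | rfl | rfl | rfl
  all_goals decide

/-- `shr r13b, 4` writes the low byte of r13; `mov ecx, r13d ; shl ebx, cl` then reads that byte back. -/
theorem low_byte_back (x : BitVec 32) :
    BitVec.setWidth 8 (Word.part Width.w32 (Word.writePart Width.w8 (Word.ofBV x) (BitVec.setWidth 8 x >>> 4))) =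
      BitVec.setWidth 8 x >>> 4 := by
  unfold Word.part Word.writePart Word.ofBV
  simp only [Width.bits]
  bv_decide

/-- **HD3 from the three tests of lines 3659 – 3661** on `x = get8(f)`: `log0 = x & 15`, `log1 = (uint8) x >> 4`,
`6 ≤ log0 ≤ log1 ≤ 13` (the two unsigned `lea / sub ; cmp eax, 7 ; ja`, the signed `cmp r14d, r15d ; jg`), and the two stored
values `1 << log0`, `1 << log1` (shift counts taken from `cl`) are the powers of two. -/
theorem hd3_bits (x : BitVec 32)
    (h1 : (BitVec.setWidth 32 (Word.ofBV (x &&& 15#32) - 6).toBitVec).toNat ≤ 7)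
    (h2 : (BitVec.zeroExtend 32 (BitVec.setWidth 8 x >>> 4) - 6#32).toNat ≤ 7)
    (h3 : ¬ (BitVec.zeroExtend 32 (BitVec.setWidth 8 x >>> 4)).toInt < (x &&& 15#32).toInt) :
    ∃ a b : Nat, 6 ≤ a ∧ a ≤ b ∧ b ≤ 13 ∧
      (1#32 <<< ((BitVec.setWidth 8 (x &&& 15#32)).toNat % 32)).toInt = ((2 ^ a : Nat) : Int) ∧
      (1#32 <<< ((BitVec.setWidth 8 (Word.part Width.w32 (Word.writePart Width.w8 (Word.ofBV x)
        (BitVec.setWidth 8 x >>> 4)))).toNat % 32)).toInt = ((2 ^ b : Nat) : Int) := by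
  rw [low_byte_back]
  -- the two logarithms as numbers
  have hx := x.isLt
  have ea : (x &&& 15#32).toNat = x.toNat % 16 := by
    rw [BitVec.toNat_and]
    exact Nat.and_two_pow_sub_one_eq_mod x.toNat 4
  have eb : (BitVec.setWidth 8 x >>> 4).toNat = x.toNat % 256 / 16 := by
    rw [BitVec.toNat_ushiftRight, BitVec.toNat_setWidth, Nat.shiftRight_eq_div_pow]
  have ea8 : (BitVec.setWidth 8 (x &&& 15#32)).toNat = x.toNat % 16 := by
    rw [BitVec.toNat_setWidth, ea]
    omega
  have eb32 : (BitVec.zeroExtend 32 (BitVec.setWidth 8 x >>> 4)).toNat = x.toNat % 256 / 16 := by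
    simp only [BitVec.zeroExtend, BitVec.toNat_setWidth] at eb ⊢
    omega
  have ha16 : x.toNat % 16 < 16 := Nat.mod_lt _ (by decide)
  have hb16 : x.toNat % 256 / 16 < 16 := by omega
  -- the three tests, as arithmetic
  have k1 : 6 ≤ x.toNat % 16 ∧ x.toNat % 16 ≤ 13 := by
    rw [BitVec.toNat_setWidth, UInt64.toNat_toBitVec, UInt64.toNat_sub, Vorbis.toNat_ofBV32, ea] at h1
    have e6 : (6 : UInt64).toNat = 6 := rfl
    rw [e6] at h1
    omega
  have k2 : 6 ≤ x.toNat % 256 / 16 ∧ x.toNat % 256 / 16 ≤ 13 := by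
    rw [BitVec.toNat_sub, eb32] at h2
    have e6 : (6#32).toNat = 6 := rfl
    rw [e6] at h2
    omega
  have k3 : x.toNat % 16 ≤ x.toNat % 256 / 16 := by
    rw [toInt_of_lt _ (by rw [eb32]; omega), toInt_of_lt _ (by rw [ea]; omega), eb32, ea] at h3
    omega
  refine ⟨x.toNat % 16, x.toNat % 256 / 16, k1.1, k3, k2.2, ?_, ?_⟩
  · rw [ea8]
    exact pow_shift _ k1.1 k1.2
  · rw [eb]
    exact pow_shift _ k2.1 k2.2

end Vorbis.Spec.start_decoder_3
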